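-- pv_equiv track=rewrite | github.com/m-alvaradox/MercadoLibre | Sistema_MercadoLibre.py | separarDigitos
-- ===== SOURCE A (Python) =====
-- def separarDigitos(tarjeta):
--    numbercard = ""
--    espacios = 0
--    contador = 1
--
--    for i in tarjeta:
--       if espacios == 3:
--          numbercard = numbercard+i
--
--       elif contador !=4:
--          numbercard = numbercard+i
--          contador += 1
--       else:
--          numbercard = numbercard+i+" "
--          espacios += 1
--          contador = 1
--
--    return numbercard
-- ===== SOURCE B (Python) =====
-- def separarDigitos(tarjeta):
--     groups = [tarjeta[0:4], tarjeta[4:8], tarjeta[8:12]]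
--     return "".join(g + " " if len(g) == 4 else g for g in groups) + tarjeta[12:]
-- ===== Notes on version B (the rewrite author's own statement) =====
-- stated objective: simpler
-- what changed: Replaced the counter-and-space-count character loop with slicing the string into three fixed 4-character groups, appending a space only after full groups, plus the untouched tail from index 12.
import Mathlib
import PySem

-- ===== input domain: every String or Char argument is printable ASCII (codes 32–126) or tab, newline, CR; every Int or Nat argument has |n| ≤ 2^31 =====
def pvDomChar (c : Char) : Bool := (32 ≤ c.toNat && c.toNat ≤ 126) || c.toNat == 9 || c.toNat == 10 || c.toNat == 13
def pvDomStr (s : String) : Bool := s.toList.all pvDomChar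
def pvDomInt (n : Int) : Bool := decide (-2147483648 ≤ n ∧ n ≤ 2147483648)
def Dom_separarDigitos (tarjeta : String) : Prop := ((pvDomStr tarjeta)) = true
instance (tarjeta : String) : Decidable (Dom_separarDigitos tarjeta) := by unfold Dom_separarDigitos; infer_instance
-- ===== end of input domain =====

-- B replaces A's counter-driven character loop by a fixed slice-into-groups-of-4 decomposition (objective: simpler); return values proved equal on all strings.


-- ===== PORT A =====
-- A's loop body: state (numbercard, espacios, contador), branches in A's order
def sepStep (st : List Char × Int × Int) (i : Char) : List Char × Int × Int :=
  let (numbercard, espacios, contador) := st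
  if espacios = 3 then (numbercard ++ [i], espacios, contador)
  else if contador ≠ 4 then (numbercard ++ [i], espacios, contador + 1)
  else (numbercard ++ [i, ' '], espacios + 1, 1)

def separarDigitos (tarjeta : String) : String :=
  String.ofList (tarjeta.toList.foldl sepStep ([], 0, 1)).1

-- ===== PORT B =====
-- Source B's per-group rule: g + " " if len(g) == 4 else g
def sepGroup (g : List Char) : List Char := if g.length = 4 then g ++ [' '] else g

def separarDigitos_alt (tarjeta : String) : String :=
  let l := tarjeta.toList
  let groups := [PySem.List.slice l (some 0) (some 4),
                 PySem.List.slice l (some 4) (some 8),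
                 PySem.List.slice l (some 8) (some 12)]
  String.ofList ((groups.map sepGroup).flatten ++ PySem.List.slice l (some 12) none)

-- ===== PRECONDITION & SPEC =====
def Spec_separarDigitos (tarjeta : String) (out : String) : Prop := out = separarDigitos_alt tarjeta
instance (tarjeta : String) (out : String) : Decidable (Spec_separarDigitos tarjeta out) := by unfold Spec_separarDigitos; infer_instance

-- ===== CLAIM (what is proved, stated in full; the proofs are below) =====
def Claim_equal_separarDigitos : Prop := ∀ (tarjeta : String), Dom_separarDigitos tarjeta → Spec_separarDigitos tarjeta (separarDigitos tarjeta)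

-- ===== LEMMAS AND PROOFS =====

-- once espacios = 3, A just appends every remaining character
theorem foldA_esp3 (l acc : List Char) (c : Int) :
    l.foldl sepStep (acc, 3, c) = (acc ++ l, 3, c) := by
  induction l generalizing acc with
  | nil => simp
  | cons a t ih => simp [sepStep, ih]

theorem sep_eq_lists (l : List Char) :
    (l.foldl sepStep ([], 0, 1)).1 =
      ([PySem.List.slice l (some 0) (some 4),
        PySem.List.slice l (some 4) (some 8),
        PySem.List.slice l (some 8) (some 12)].map sepGroup).flatten
        ++ PySem.List.slice l (some 12) none := by
  rw [PySem.List.slice_toNat l (by norm_num) (by norm_num),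
      PySem.List.slice_toNat l (by norm_num) (by norm_num),
      PySem.List.slice_toNat l (by norm_num) (by norm_num),
      PySem.List.slice_from l (by norm_num)]
  rcases l with _ | ⟨a1, l⟩; · decide
  rcases l with _ | ⟨a2, l⟩; · simp [sepStep, sepGroup]
  rcases l with _ | ⟨a3, l⟩; · simp [sepStep, sepGroup]
  rcases l with _ | ⟨a4, l⟩; · simp [sepStep, sepGroup]
  rcases l with _ | ⟨a5, l⟩; · simp [sepStep, sepGroup]
  rcases l with _ | ⟨a6, l⟩; · simp [sepStep, sepGroup]
  rcases l with _ | ⟨a7, l⟩; · simp [sepStep, sepGroup]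
  rcases l with _ | ⟨a8, l⟩; · simp [sepStep, sepGroup]
  rcases l with _ | ⟨a9, l⟩; · simp [sepStep, sepGroup]
  rcases l with _ | ⟨a10, l⟩; · simp [sepStep, sepGroup]
  rcases l with _ | ⟨a11, l⟩; · simp [sepStep, sepGroup]
  rcases l with _ | ⟨a12, l⟩; · simp [sepStep, sepGroup]
  simp [sepStep, sepGroup, foldA_esp3]

-- ===== VERDICT (by name: the statement is the Claim_ definition above) =====
theorem separarDigitos_spec : Claim_equal_separarDigitos := by
  intro t _
  unfold Spec_separarDigitos separarDigitos separarDigitos_alt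
  rw [sep_eq_lists]
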